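-- pv_equiv track=rewrite | github.com/samhorsfield96/pangenome_LLM | token_annotation/token_likelihood_position.py | build_position_profiles_dict
-- ===== SOURCE A (Python) =====
-- from collections import Counter
--
-- def build_position_profiles_dict(data, top_elements, ignore_others=False):
--     """
--     Build a dictionary where each key is an element label and each value is a list of counts per position.
--     """
--     data_T = list(zip(*data))  # Transpose so positions are outermost
--     profiles = {label: [] for label in top_elements}
--     if not ignore_others:
--         profiles["Other"] = []
--
--     for pos in data_T:
--         count = Counter(pos)
--         for label in top_elements:
--             profiles[label].append(count.get(label, 0))
--         if not ignore_others:
--             other_count = sum(v for k, v in count.items() if k not in top_elements)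
--             profiles["Other"].append(other_count)
--
--     return profiles
-- ===== SOURCE B (Python) =====
-- def build_position_profiles_dict(data, top_elements, ignore_others=False):
--     """
--     Build a dictionary where each key is an element label and each value is a list of counts per position.
--     Single element-wise accumulation over rows instead of transpose + per-position Counter.
--     """
--     P = min((len(row) for row in data), default=0)  # zip(*data) truncates to shortest row
--     top_set = set(top_elements)
--     profiles = {label: [0] * P for label in top_elements}
--     other = [0] * P
--     for row in data:
--         for p in range(P):
--             x = row[p]
--             if x in top_set:
--                 profiles[x][p] += 1
--             elif not ignore_others:
--                 other[p] += 1
--     if not ignore_others: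
--         profiles["Other"] = other
--     return profiles
-- ===== Notes on version B (the rewrite author's own statement) =====
-- stated objective: alternative
-- what changed: Replaces the transpose-plus-per-position-Counter with a single row-major element-wise accumulation into preallocated count arrays (membership against a set of top labels), assembling the dict once.
-- outside the precondition, e.g. on build_position_profiles_dict([['a', 'b']], ['a', 'a'], True): A returns {'a': [1, 1, 0, 0]}, B returns {'a': [1, 0]}
import Mathlib
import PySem

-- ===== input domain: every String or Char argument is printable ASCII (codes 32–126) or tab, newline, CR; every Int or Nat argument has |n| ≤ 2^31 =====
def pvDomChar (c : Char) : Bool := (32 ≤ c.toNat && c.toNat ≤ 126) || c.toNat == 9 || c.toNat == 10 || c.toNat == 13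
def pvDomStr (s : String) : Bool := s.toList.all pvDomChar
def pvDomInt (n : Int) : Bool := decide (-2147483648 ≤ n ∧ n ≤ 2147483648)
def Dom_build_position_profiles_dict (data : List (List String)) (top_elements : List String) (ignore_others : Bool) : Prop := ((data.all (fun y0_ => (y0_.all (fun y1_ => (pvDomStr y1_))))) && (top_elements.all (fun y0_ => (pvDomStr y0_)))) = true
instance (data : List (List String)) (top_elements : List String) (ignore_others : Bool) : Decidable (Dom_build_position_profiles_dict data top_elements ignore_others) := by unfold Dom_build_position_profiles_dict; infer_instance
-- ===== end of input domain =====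

-- B replaces A's transpose + per-position Counter with one row-major element-wise accumulation
-- into preallocated count arrays; objective: alternative algorithm of similar cost.

-- ===== PORT A =====
-- zip(*data): positions 0..min(row length)-1, each position as the list of row[p] in row order; [] for data = [].
def pyZipStar (data : List (List String)) : List (List String) :=
  match data with
  | [] => []
  | r :: rs =>
    (List.range (rs.foldl (fun m row => min m row.length) r.length)).map
      (fun p => (r :: rs).map (fun row => row.getD p ""))  -- p < every row's length, so getD is exact

-- body of A's 'for pos in data_T' loop
def aStep (top_elements : List String) (ignore_others : Bool)
    (profiles : PySem.Dict String (List Int)) (pos : List String) :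
    PySem.Dict String (List Int) :=
  let count := PySem.Dict.counter pos
  let profiles := top_elements.foldl
    (fun d label => d.modify label [] (fun v => v ++ [count.getD label 0])) profiles
  if !ignore_others then
    profiles.modify "Other" []
      (fun v => v ++ [(count.items.filter (fun kv => !(top_elements.contains kv.1))).foldl
          (fun s kv => s + kv.2) 0])
  else profiles

def build_position_profiles_dict (data : List (List String)) (top_elements : List String) (ignore_others : Bool) : List (String × List Int) :=
  let data_T := pyZipStar data
  let profiles : PySem.Dict String (List Int) :=
    top_elements.foldl (fun d label => d.insert label []) PySem.Dict.empty
  let profiles := if !ignore_others then profiles.insert "Other" [] else profiles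
  (data_T.foldl (aStep top_elements ignore_others) profiles).items

-- ===== PORT B =====
-- body of B's 'for p in range(P)' loop; state = (profiles, other)
def bStep (topSet : PySem.Set String) (ignore_others : Bool) (row : List String)
    (st : PySem.Dict String (List Int) × List Int) (p : Nat) :
    PySem.Dict String (List Int) × List Int :=
  let x := row.getD p ""   -- row[p]; p < P ≤ len(row), so getD is exact
  if topSet.contains x then
    (st.1.modify x [] (fun v => v.set p (v.getD p 0 + 1)), st.2)
  else if !ignore_others then
    (st.1, st.2.set p (st.2.getD p 0 + 1))
  else st

def build_position_profiles_dict_alt (data : List (List String)) (top_elements : List String) (ignore_others : Bool) : List (String × List Int) :=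
  let P : Nat := match data with
    | [] => 0
    | r :: rs => rs.foldl (fun m row => min m row.length) r.length   -- min(len(row) for row in data)
  let topSet := PySem.Set.ofList top_elements
  let init : PySem.Dict String (List Int) :=
    top_elements.foldl (fun d label => d.insert label (List.replicate P 0)) PySem.Dict.empty
  let st := data.foldl
      (fun st row => (List.range P).foldl (bStep topSet ignore_others row) st)
      (init, List.replicate P (0 : Int))
  let profiles := if !ignore_others then st.1.insert "Other" st.2 else st.1
  profiles.items

-- ===== PRECONDITION & SPEC =====
-- Pre_ excludes two defensible-corner artefacts of A's dict bookkeeping: duplicate labels in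
-- top_elements (A then appends the same count several times per position to the one shared list),
-- and a literal "Other" label while others are counted (A then resets that entry and interleaves
-- label counts with other-counts in it).
def Pre_build_position_profiles_dict (data : List (List String)) (top_elements : List String) (ignore_others : Bool) : Prop :=
  top_elements.Nodup ∧ (ignore_others = false → "Other" ∉ top_elements)
instance (data : List (List String)) (top_elements : List String) (ignore_others : Bool) : Decidable (Pre_build_position_profiles_dict data top_elements ignore_others) := by unfold Pre_build_position_profiles_dict; infer_instance

def pvWitness_build_position_profiles_dict : List (List String) × List String × Bool :=
  ([["a", "b"], ["b", "c", "a"]], ["a", "b"], false)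

def Spec_build_position_profiles_dict (data : List (List String)) (top_elements : List String) (ignore_others : Bool) (out : List (String × List Int)) : Prop := out = build_position_profiles_dict_alt data top_elements ignore_others
instance (data : List (List String)) (top_elements : List String) (ignore_others : Bool) (out : List (String × List Int)) : Decidable (Spec_build_position_profiles_dict data top_elements ignore_others out) := by unfold Spec_build_position_profiles_dict; infer_instance

-- ===== CLAIM (what is proved, stated in full; the proofs are below) =====
def Claim_equal_build_position_profiles_dict : Prop := ∀ (data : List (List String)) (top_elements : List String) (ignore_others : Bool), Dom_build_position_profiles_dict data top_elements ignore_others → Pre_build_position_profiles_dict data top_elements ignore_others → Spec_build_position_profiles_dict data top_elements ignore_others (build_position_profiles_dict data top_elements ignore_others)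

-- ===== LEMMAS AND PROOFS =====

-- ---- generic helpers ----

def pvMinLen (data : List (List String)) : Nat :=
  match data with
  | [] => 0
  | r :: rs => rs.foldl (fun m row => min m row.length) r.length

def pvCol (data : List (List String)) (p : Nat) : List String :=
  data.map (fun row => row.getD p "")

-- the common canonical value both ports compute
def pvCanon (data : List (List String)) (tops : List String) (ign : Bool) : List (String × List Int) :=
  (tops.map (fun k => (k, (List.range (pvMinLen data)).map (fun p => ((pvCol data p).count k : Int)))))
  ++ (if ign then [] else
      [("Other", (List.range (pvMinLen data)).map
          (fun p => (((pvCol data p).countP (fun x => !(tops.contains x)) : Int))))])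

theorem pvZip_eq (data : List (List String)) :
    pyZipStar data = (List.range (pvMinLen data)).map (pvCol data) := by
  cases data with
  | nil => rfl
  | cons r rs => rfl

theorem pvSetContains (tops : List String) (x : String) :
    (PySem.Set.ofList tops).contains x = tops.contains x := by
  simp [PySem.Set.mem_ofList]

-- sum over Counter items of values at keys outside tops = number of elements outside tops
theorem pvOtherSum (tops pos : List String) :
    ((PySem.Dict.counter pos).items.filter (fun kv => !(tops.contains kv.1))).foldl
        (fun s kv => s + kv.2) 0
      = (pos.countP (fun x => !(tops.contains x)) : Int) := by
  rw [show ((PySem.Dict.counter pos).items.filter (fun kv => !(tops.contains kv.1))).foldl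
        (fun s kv => s + kv.2) 0
      = 0 + (((PySem.Dict.counter pos).items.filter (fun kv => !(tops.contains kv.1))).map
          (fun kv => kv.2)).sum from
    PySem.List.foldl_add _ _ 0, zero_add, PySem.Dict.items_counter, List.filter_map, List.map_map]
  have hmap : ((PySem.Set.ofList pos).filter ((fun kv => !tops.contains kv.1) ∘ fun k =>
        (k, (List.count k pos : Int)))).map ((fun kv => kv.2) ∘ fun k => (k, (List.count k pos : Int)))
      = ((PySem.Set.ofList pos).filter (fun k => !tops.contains k)).map
          (fun k => ((List.count k pos : Nat) : Int)) := rfl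
  have hcast : (((PySem.Set.ofList pos).filter (fun k => !tops.contains k)).map
      (fun k => ((List.count k pos : Nat) : Int))).sum
      = ((((PySem.Set.ofList pos).filter (fun k => !tops.contains k)).map
        (fun k => List.count k pos)).sum : Int) := by
    rw [Nat.cast_list_sum, List.map_map]
    simp [Function.comp_def]
  rw [hmap, hcast, Nat.cast_inj]
  -- now a Nat statement: sum of counts over the distinct "other" elements = countP
  set q : String → Bool := fun x => !tops.contains x with hq
  set T : List String := (PySem.Set.ofList pos).filter q with hT
  have hTnd : T.Nodup := (PySem.Set.nodup_ofList pos).filter _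
  have hTmem : ∀ k, k ∈ T ↔ k ∈ pos.filter q := by
    intro k
    simp [hT, List.mem_filter, PySem.Set.mem_ofList]
  have hcnt : ∀ k ∈ T, List.count k pos = List.count k (pos.filter q) := by
    intro k hk
    have hqk : q k = true := (List.mem_filter.mp hk).2
    rw [List.count_filter hqk]
  rw [List.map_congr_left hcnt, ← List.sum_toFinset _ hTnd]
  have hfin : T.toFinset = (pos.filter q).toFinset := by
    ext k; simp [List.mem_toFinset, hTmem]
  rw [hfin]
  have := Multiset.toFinset_sum_count_eq (pos.filter q : Multiset String)
  simpa [List.countP_eq_length_filter] using this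

-- ---- initial dict (shared shape: constant value per fresh label) ----

theorem pvInit_items (tops : List String) (hnd : tops.Nodup) (v : List Int) :
    (tops.foldl (fun d l => d.insert l v) (PySem.Dict.empty : PySem.Dict String (List Int))).items
      = tops.map (fun l => (l, v)) := by
  have h := PySem.Dict.items_foldl_insert_fresh tops (fun a => a) (fun _ => v)
      (PySem.Dict.empty : PySem.Dict String (List Int))
      (fun a _ => PySem.Dict.contains_empty a) (by simpa using hnd)
  simpa using h

theorem pvInit_keys (tops : List String) (hnd : tops.Nodup) (v : List Int) :
    (tops.foldl (fun d l => d.insert l v) (PySem.Dict.empty : PySem.Dict String (List Int))).keys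
      = tops := by
  have h := pvInit_items tops hnd v
  have : (tops.foldl (fun d l => d.insert l v)
      (PySem.Dict.empty : PySem.Dict String (List Int))).keys
      = ((tops.foldl (fun d l => d.insert l v)
      (PySem.Dict.empty : PySem.Dict String (List Int))).items).map (·.1) := rfl
  rw [this, h, List.map_map]
  simp [Function.comp_def]

theorem pvInit_getD (tops : List String) (hnd : tops.Nodup) (v : List Int) (k : String) :
    (tops.foldl (fun d l => d.insert l v) (PySem.Dict.empty : PySem.Dict String (List Int))).getD k []
      = if k ∈ tops then v else [] := by
  by_cases hk : k ∈ tops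
  · have hmem : (k, v) ∈ (tops.foldl (fun d l => d.insert l v)
        (PySem.Dict.empty : PySem.Dict String (List Int))).items := by
      rw [pvInit_items tops hnd v]
      exact List.mem_map.mpr ⟨k, hk, rfl⟩
    rw [PySem.Dict.getD_of_mem_items _ hmem (by rw [pvInit_keys tops hnd v]; exact hnd) []]
    simp [hk]
  · rw [PySem.Dict.getD_of_not_contains _ []
      (by rw [PySem.Dict.contains_eq_decide_mem_keys, pvInit_keys tops hnd v]; simpa using hk)]
    simp [hk]

-- ---- A side ----

theorem pvModLoop_getD (g : String → List Int → List Int) (l : List String) (hl : l.Nodup)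
    (d : PySem.Dict String (List Int)) (k : String) :
    (l.foldl (fun d x => d.modify x [] (g x)) d).getD k []
      = if k ∈ l then g k (d.getD k []) else d.getD k [] := by
  induction l generalizing d with
  | nil => simp
  | cons x xs ih =>
    have hx : x ∉ xs := (List.nodup_cons.mp hl).1
    have hxs : xs.Nodup := (List.nodup_cons.mp hl).2
    rw [List.foldl_cons, ih hxs]
    by_cases hmem : k ∈ xs
    · have hne : k ≠ x := fun h => hx (h ▸ hmem)
      rw [PySem.Dict.getD_modify]
      simp [hmem, hne, List.mem_cons]
    · rw [PySem.Dict.getD_modify]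
      by_cases hkx : k = x
      · simp [hkx, hx]
      · simp [hkx, hmem, List.mem_cons]

theorem pvModLoop_keys (g : String → List Int → List Int) (l : List String)
    (d : PySem.Dict String (List Int)) (hsub : ∀ x ∈ l, x ∈ d.keys) :
    (l.foldl (fun d x => d.modify x [] (g x)) d).keys = d.keys := by
  have h := PySem.Dict.keys_foldl_modify l ([] : List Int) (fun _ x => g x) d
  rw [h, PySem.Set.update_eq_append_filter]
  have h2 : ((PySem.Set.ofList l).filter (fun y => !(PySem.Set.contains (PySem.Dict.keys d) y))) = [] := by
    rw [List.filter_eq_nil_iff]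
    intro y hy
    have hyl : y ∈ l := (PySem.Set.mem_ofList l y).mp hy
    simp [hsub y hyl]
  rw [h2, List.append_nil]

theorem pvAStep_keys (tops : List String) (ign : Bool) (d : PySem.Dict String (List Int))
    (pos : List String) (hsub : ∀ x ∈ tops, x ∈ d.keys) (hO : ign = false → "Other" ∈ d.keys) :
    (aStep tops ign d pos).keys = d.keys := by
  simp only [aStep]
  have hml := pvModLoop_keys (fun label v => v ++ [(PySem.Dict.counter pos).getD label 0]) tops d hsub
  cases ign with
  | true => simpa using hml
  | false =>
    simp only [Bool.not_false, if_true]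
    rw [PySem.Dict.keys_modify, PySem.Dict.keys_insert_of_contains]
    · exact hml
    · rw [PySem.Dict.contains_iff_mem_keys, hml]
      exact hO rfl

theorem pvAStep_getD_top (tops : List String) (ign : Bool) (hnd : tops.Nodup)
    (hO : ign = false → "Other" ∉ tops) (d : PySem.Dict String (List Int)) (pos : List String)
    (k : String) (hk : k ∈ tops) :
    (aStep tops ign d pos).getD k [] = d.getD k [] ++ [(pos.count k : Int)] := by
  simp only [aStep]
  have hml := pvModLoop_getD (fun label v => v ++ [(PySem.Dict.counter pos).getD label 0])
      tops hnd d k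
  rw [if_pos hk] at hml
  cases ign with
  | true =>
    simpa [PySem.Dict.getD_counter] using hml
  | false =>
    have hne : k ≠ "Other" := fun h => hO rfl (h ▸ hk)
    simp only [Bool.not_false, if_true]
    rw [PySem.Dict.getD_modify, if_neg hne, hml, PySem.Dict.getD_counter]

theorem pvAStep_getD_other (tops : List String) (hnd : tops.Nodup)
    (hO : "Other" ∉ tops) (d : PySem.Dict String (List Int)) (pos : List String) :
    (aStep tops false d pos).getD "Other" []
      = d.getD "Other" [] ++ [(pos.countP (fun x => !(tops.contains x)) : Int)] := by
  simp only [aStep]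
  have hml := pvModLoop_getD (fun label v => v ++ [(PySem.Dict.counter pos).getD label 0])
      tops hnd d "Other"
  rw [if_neg hO] at hml
  simp only [Bool.not_false, if_true]
  rw [PySem.Dict.getD_modify, if_pos rfl, hml, pvOtherSum]

theorem pvAFold (tops : List String) (ign : Bool) (hnd : tops.Nodup)
    (hO : ign = false → "Other" ∉ tops) (L : List (List String)) :
    ∀ (d : PySem.Dict String (List Int)), (∀ x ∈ tops, x ∈ d.keys) →
      (ign = false → "Other" ∈ d.keys) →
      (L.foldl (aStep tops ign) d).keys = d.keys
      ∧ (∀ k ∈ tops, (L.foldl (aStep tops ign) d).getD k []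
            = d.getD k [] ++ L.map (fun pos => (pos.count k : Int)))
      ∧ (ign = false → (L.foldl (aStep tops ign) d).getD "Other" []
            = d.getD "Other" [] ++ L.map (fun pos => (pos.countP (fun x => !(tops.contains x)) : Int))) := by
  induction L with
  | nil => intro d _ _; simp
  | cons pos L ih =>
    intro d hsub hOk
    have hkstep : (aStep tops ign d pos).keys = d.keys := pvAStep_keys tops ign d pos hsub hOk
    have hsub' : ∀ x ∈ tops, x ∈ (aStep tops ign d pos).keys := by rw [hkstep]; exact hsub
    have hOk' : ign = false → "Other" ∈ (aStep tops ign d pos).keys := by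
      rw [hkstep]; exact hOk
    obtain ⟨ihk, ihtop, ihoth⟩ := ih (aStep tops ign d pos) hsub' hOk'
    refine ⟨by rw [List.foldl_cons, ihk, hkstep], ?_, ?_⟩
    · intro k hk
      rw [List.foldl_cons, ihtop k hk, pvAStep_getD_top tops ign hnd hO d pos k hk,
        List.map_cons, List.append_cons, List.append_assoc]
      simp
    · intro hign
      subst hign
      rw [List.foldl_cons, ihoth rfl, pvAStep_getD_other tops hnd (hO rfl) d pos,
        List.map_cons, List.append_cons, List.append_assoc]
      simp

theorem pvA_eq_canon (data : List (List String)) (tops : List String) (ign : Bool)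
    (hnd : tops.Nodup) (hO : ign = false → "Other" ∉ tops) :
    build_position_profiles_dict data tops ign = pvCanon data tops ign := by
  simp only [build_position_profiles_dict]
  have hkd0 : (tops.foldl (fun d label => d.insert label ([] : List Int))
      PySem.Dict.empty).keys = tops := pvInit_keys tops hnd []
  cases ign with
  | true =>
    simp only [Bool.not_true, Bool.false_eq_true, if_false]
    obtain ⟨hk, htop, _⟩ := pvAFold tops true hnd hO (pyZipStar data) _
      (by rw [hkd0]; exact fun x h => h) (by simp)
    rw [PySem.Dict.items_eq_map_keys _ (by rw [hk, hkd0]; exact hnd) ([] : List Int), hk, hkd0]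
    unfold pvCanon
    simp only [reduceIte, List.append_nil]
    refine List.map_congr_left ?_
    intro k hkmem
    rw [htop k hkmem, pvInit_getD tops hnd [] k, if_pos hkmem, List.nil_append,
      pvZip_eq, List.map_map]
    rfl
  | false =>
    have hOnot : ("Other" : String) ∉ tops := hO rfl
    simp only [Bool.not_false, if_true]
    have hcont : (tops.foldl (fun d label => d.insert label ([] : List Int))
        PySem.Dict.empty).contains "Other" = false := by
      rw [PySem.Dict.contains_eq_decide_mem_keys, hkd0]; simpa using hOnot
    have hkd1 : ((tops.foldl (fun d label => d.insert label ([] : List Int))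
        PySem.Dict.empty).insert "Other" []).keys = tops ++ ["Other"] := by
      rw [PySem.Dict.keys_insert_of_not_contains _ _ hcont, hkd0]
    obtain ⟨hk, htop, hoth⟩ := pvAFold tops false hnd hO (pyZipStar data) _
      (by rw [hkd1]; exact fun x h => List.mem_append_left _ h)
      (fun _ => by rw [hkd1]; exact List.mem_append_right _ (List.mem_singleton.mpr rfl))
    have hnd1 : (tops ++ ["Other"]).Nodup :=
      hnd.append (List.nodup_singleton _)
        (fun a ha hb => hOnot ((List.mem_singleton.mp hb) ▸ ha))
    rw [PySem.Dict.items_eq_map_keys _ (by rw [hk, hkd1]; exact hnd1) ([] : List Int), hk, hkd1,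
      List.map_append]
    unfold pvCanon
    simp only [if_neg (by simp : ¬ (false = true))]
    congr 1
    · refine List.map_congr_left ?_
      intro k hkmem
      have hne : k ≠ "Other" := fun h => hOnot (h ▸ hkmem)
      rw [htop k hkmem, PySem.Dict.getD_insert_of_ne _ _ _ hne,
        pvInit_getD tops hnd [] k, if_pos hkmem, List.nil_append, pvZip_eq, List.map_map]
      rfl
    · rw [List.map_singleton, hoth rfl, PySem.Dict.getD_insert_self, List.nil_append,
        pvZip_eq, List.map_map]
      rfl

-- ---- B side ----

theorem pvSet_getD (v : List Int) (p j : Nat) (hp : p < v.length) :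
    (v.set p (v.getD p 0 + 1)).getD j 0 = if j = p then v.getD p 0 + 1 else v.getD j 0 := by
  by_cases h : j = p
  · subst h
    simp [List.getD_eq_getElem?_getD, List.getElem?_set, hp]
  · have h' : p ≠ j := fun hh => h hh.symm
    simp [List.getD_eq_getElem?_getD, h, h']

theorem pvListEq (v w : List Int) (hl : v.length = w.length)
    (h : ∀ j, j < w.length → v.getD j 0 = w.getD j 0) : v = w := by
  apply List.ext_getElem hl
  intro j hj1 hj2
  have h2 := h j hj2
  rw [List.getD_eq_getElem?_getD, List.getD_eq_getElem?_getD, List.getElem?_eq_getElem hj1,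
    List.getElem?_eq_getElem hj2] at h2
  simpa using h2

theorem pvBInner (tops : List String) (ign : Bool) (row : List String) (P : Nat) (ps : List Nat)
    (hnd : ps.Nodup) (hlt : ∀ p ∈ ps, p < P) :
    ∀ (st : PySem.Dict String (List Int) × List Int),
      st.1.keys = tops → (∀ k ∈ tops, (st.1.getD k []).length = P) → st.2.length = P →
      let res := ps.foldl (bStep (PySem.Set.ofList tops) ign row) st
      res.1.keys = tops
      ∧ (∀ k ∈ tops, (res.1.getD k []).length = P) ∧ res.2.length = P
      ∧ (∀ k ∈ tops, ∀ j, (res.1.getD k []).getD j 0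
            = (st.1.getD k []).getD j 0 + (if j ∈ ps ∧ row.getD j "" = k then 1 else 0))
      ∧ (∀ j, res.2.getD j 0
            = st.2.getD j 0
              + (if ign = false ∧ j ∈ ps ∧ tops.contains (row.getD j "") = false then 1 else 0)) := by
  revert hnd hlt
  induction ps with
  | nil =>
    intro _ _ st h1 h2 h3
    refine ⟨h1, h2, h3, ?_, ?_⟩
    · intro k _ j; simp
    · intro j; simp
  | cons p ps ih =>
    intro hnd hlt st h1 h2 h3
    have hp : p < P := hlt p (List.mem_cons_self)
    have hpnotin : p ∉ ps := (List.nodup_cons.mp hnd).1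
    have hnd' : ps.Nodup := (List.nodup_cons.mp hnd).2
    have hlt' : ∀ q ∈ ps, q < P := fun q hq => hlt q (List.mem_cons_of_mem _ hq)
    set x := row.getD p "" with hx
    by_cases hc : (PySem.Set.ofList tops).contains x = true
    · -- x is a top label: its profile vector is bumped at position p
      have hxtops : x ∈ tops := by
        have := pvSetContains tops x
        rw [hc] at this
        simpa using this.symm
      have hcont : st.1.contains x = true := by
        rw [PySem.Dict.contains_eq_decide_mem_keys, h1]; simpa using hxtops
      have hstep : bStep (PySem.Set.ofList tops) ign row st p
          = (st.1.modify x [] (fun v => v.set p (v.getD p 0 + 1)), st.2) := by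
        simp only [bStep]
        rw [← hx, if_pos hc]
      have hkeys' : (st.1.modify x [] (fun v => v.set p (v.getD p 0 + 1))).keys = tops := by
        rw [PySem.Dict.keys_modify, PySem.Dict.keys_insert_of_contains _ _ hcont, h1]
      have hgd : ∀ k, (st.1.modify x [] (fun v => v.set p (v.getD p 0 + 1))).getD k []
          = if k = x then (st.1.getD x []).set p ((st.1.getD x []).getD p 0 + 1)
            else st.1.getD k [] := fun k => PySem.Dict.getD_modify st.1 x k [] _
      have h2' : ∀ k ∈ tops, ((st.1.modify x [] (fun v => v.set p (v.getD p 0 + 1))).getD k []).length = P := by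
        intro k hk
        rw [hgd k]
        by_cases hkx : k = x
        · rw [if_pos hkx, List.length_set]; exact h2 x hxtops
        · rw [if_neg hkx]; exact h2 k hk
      obtain ⟨r1, r2, r3, r4, r5⟩ := ih hnd' hlt'
        (st.1.modify x [] (fun v => v.set p (v.getD p 0 + 1)), st.2) hkeys' h2' h3
      rw [List.foldl_cons, hstep]
      refine ⟨r1, r2, r3, ?_, ?_⟩
      · intro k hk j
        rw [r4 k hk j, hgd k]
        have hlenx : p < (st.1.getD x []).length := by rw [h2 x hxtops]; exact hp
        by_cases hkx : k = x
        · rw [hkx, if_pos rfl]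
          by_cases hjp : j = p
          · subst hjp
            rw [pvSet_getD _ _ _ hlenx, if_pos rfl, if_neg (fun h => hpnotin h.1), add_zero,
              if_pos ⟨List.mem_cons_self, hx.symm⟩]
          · rw [pvSet_getD _ _ _ hlenx, if_neg hjp]
            have hiff : (j ∈ p :: ps ∧ row.getD j "" = x) ↔ (j ∈ ps ∧ row.getD j "" = x) := by
              rw [List.mem_cons]; tauto
            rw [if_congr hiff rfl rfl]
        · rw [if_neg hkx]
          by_cases hjp : j = p
          · subst hjp
            rw [if_neg (fun h => hpnotin h.1), add_zero,
              if_neg (fun h => hkx (hx.trans h.2).symm), add_zero]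
          · have hiff : (j ∈ p :: ps ∧ row.getD j "" = k) ↔ (j ∈ ps ∧ row.getD j "" = k) := by
              rw [List.mem_cons]; tauto
            rw [if_congr hiff rfl rfl]
      · intro j
        rw [r5 j]
        have hxc : tops.contains x = true := by rw [← pvSetContains]; exact hc
        by_cases hjp : j = p
        · subst hjp
          rw [if_neg (fun h => hpnotin h.2.1),
            if_neg (fun h => by rw [← hx] at h; rw [hxc] at h; exact absurd h.2.2 (by decide))]
        · have hiff : (ign = false ∧ j ∈ p :: ps ∧ tops.contains (row.getD j "") = false)
              ↔ (ign = false ∧ j ∈ ps ∧ tops.contains (row.getD j "") = false) := by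
            rw [List.mem_cons]; tauto
          rw [if_congr hiff rfl rfl]
    · -- x is not a top label
      have hxc : tops.contains x = false := by rw [← pvSetContains]; simpa using hc
      have hxnot : x ∉ tops := by simpa using hxc
      have hrowiff : ∀ k, k ∈ tops → ¬ (row.getD p "" = k) :=
        fun k hk h => hxnot ((hx.trans h) ▸ hk)
      cases ign with
      | false =>
        have hstep : bStep (PySem.Set.ofList tops) false row st p
            = (st.1, st.2.set p (st.2.getD p 0 + 1)) := by
          simp only [bStep]
          rw [← hx, if_neg hc]
          rfl
        have h3' : (st.2.set p (st.2.getD p 0 + 1)).length = P := by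
          rw [List.length_set]; exact h3
        obtain ⟨r1, r2, r3, r4, r5⟩ := ih hnd' hlt' (st.1, st.2.set p (st.2.getD p 0 + 1)) h1 h2 h3'
        rw [List.foldl_cons, hstep]
        refine ⟨r1, r2, r3, ?_, ?_⟩
        · intro k hk j
          rw [r4 k hk j]
          by_cases hjp : j = p
          · subst hjp
            rw [if_neg (fun h => hpnotin h.1), add_zero, if_neg (fun h => hrowiff k hk h.2), add_zero]
          · have hiff : (j ∈ p :: ps ∧ row.getD j "" = k) ↔ (j ∈ ps ∧ row.getD j "" = k) := by
              rw [List.mem_cons]; tauto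
            rw [if_congr hiff rfl rfl]
        · intro j
          rw [r5 j]
          have hlen2 : p < st.2.length := by rw [h3]; exact hp
          by_cases hjp : j = p
          · subst hjp
            rw [pvSet_getD _ _ _ hlen2, if_pos rfl, if_neg (fun h => hpnotin h.2.1), add_zero,
              if_pos ⟨rfl, List.mem_cons_self, by rw [← hx]; exact hxc⟩]
          · rw [pvSet_getD _ _ _ hlen2, if_neg hjp]
            have hiff : (false = false ∧ j ∈ p :: ps ∧ tops.contains (row.getD j "") = false)
                ↔ (false = false ∧ j ∈ ps ∧ tops.contains (row.getD j "") = false) := by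
              rw [List.mem_cons]; tauto
            rw [if_congr hiff rfl rfl]
      | true =>
        have hstep : bStep (PySem.Set.ofList tops) true row st p = st := by
          simp only [bStep]
          rw [← hx, if_neg hc]
          rfl
        obtain ⟨r1, r2, r3, r4, r5⟩ := ih hnd' hlt' st h1 h2 h3
        rw [List.foldl_cons, hstep]
        refine ⟨r1, r2, r3, ?_, ?_⟩
        · intro k hk j
          rw [r4 k hk j]
          by_cases hjp : j = p
          · subst hjp
            rw [if_neg (fun h => hpnotin h.1), add_zero, if_neg (fun h => hrowiff k hk h.2), add_zero]
          · have hiff : (j ∈ p :: ps ∧ row.getD j "" = k) ↔ (j ∈ ps ∧ row.getD j "" = k) := by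
              rw [List.mem_cons]; tauto
            rw [if_congr hiff rfl rfl]
        · intro j
          rw [r5 j]
          rw [if_neg (fun h => absurd h.1 (by decide)), if_neg (fun h => absurd h.1 (by decide))]

theorem pvBOuter (tops : List String) (ign : Bool) (P : Nat) (L : List (List String)) :
    ∀ (st : PySem.Dict String (List Int) × List Int),
      st.1.keys = tops → (∀ k ∈ tops, (st.1.getD k []).length = P) → st.2.length = P →
      let res := L.foldl (fun st row => (List.range P).foldl (bStep (PySem.Set.ofList tops) ign row) st) st
      res.1.keys = tops
      ∧ (∀ k ∈ tops, (res.1.getD k []).length = P) ∧ res.2.length = P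
      ∧ (∀ k ∈ tops, ∀ j, j < P → (res.1.getD k []).getD j 0
            = (st.1.getD k []).getD j 0 + (L.countP (fun row => row.getD j "" == k) : Int))
      ∧ (∀ j, j < P → res.2.getD j 0
            = st.2.getD j 0
              + (if ign = false then (L.countP (fun row => !(tops.contains (row.getD j ""))) : Int) else 0)) := by
  induction L with
  | nil =>
    intro st h1 h2 h3
    refine ⟨h1, h2, h3, ?_, ?_⟩
    · intro k _ j _; simp
    · intro j _; cases ign <;> simp
  | cons row L ih =>
    intro st h1 h2 h3
    obtain ⟨i1, i2, i3, i4, i5⟩ := pvBInner tops ign row P (List.range P) List.nodup_range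
      (fun p hp => List.mem_range.mp hp) st h1 h2 h3
    obtain ⟨o1, o2, o3, o4, o5⟩ := ih _ i1 i2 i3
    rw [List.foldl_cons]
    refine ⟨o1, o2, o3, ?_, ?_⟩
    · intro k hk j hj
      rw [o4 k hk j hj, i4 k hk j, List.countP_cons]
      push_cast
      by_cases hcond : row.getD j "" = k
      · rw [if_pos ⟨List.mem_range.mpr hj, hcond⟩, if_pos (by simpa using hcond)]
        ring
      · rw [if_neg (fun h => hcond h.2), if_neg (by simpa using hcond)]
        ring
    · intro j hj
      rw [o5 j hj, i5 j]
      cases ign with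
      | true =>
        rw [if_neg (fun h => absurd h.1 (by decide)), if_neg (by decide), if_neg (by decide)]
        ring
      | false =>
        rw [if_pos rfl, if_pos rfl, List.countP_cons]
        push_cast
        by_cases hcond : tops.contains (row.getD j "") = false
        · rw [if_pos ⟨rfl, List.mem_range.mpr hj, hcond⟩, if_pos (by simpa using hcond)]
          ring
        · rw [if_neg (fun h => hcond h.2.2), if_neg (by simpa using hcond)]
          ring

theorem pvB_eq_canon (data : List (List String)) (tops : List String) (ign : Bool)
    (hnd : tops.Nodup) (hO : ign = false → "Other" ∉ tops) :
    build_position_profiles_dict_alt data tops ign = pvCanon data tops ign := by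
  simp only [build_position_profiles_dict_alt]
  rw [show (match data with
      | [] => 0
      | r :: rs => rs.foldl (fun m row => min m row.length) r.length) = pvMinLen data from rfl]
  set P := pvMinLen data with hP
  set init := tops.foldl (fun d label => d.insert label (List.replicate P 0))
    (PySem.Dict.empty : PySem.Dict String (List Int)) with hinit
  have h1 : init.keys = tops := pvInit_keys tops hnd _
  have h2 : ∀ k ∈ tops, (init.getD k []).length = P := by
    intro k hk
    rw [hinit, pvInit_getD tops hnd _ k, if_pos hk, List.length_replicate]
  have h3 : (List.replicate P (0 : Int)).length = P := List.length_replicate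
  obtain ⟨o1, o2, o3, o4, o5⟩ := pvBOuter tops ign P data (init, List.replicate P 0) h1 h2 h3
  set st := data.foldl
      (fun st row => (List.range P).foldl (bStep (PySem.Set.ofList tops) ign row) st)
      (init, List.replicate P (0 : Int)) with hst
  have hRHSgetD : ∀ (f : Nat → Int) (j : Nat), j < P → ((List.range P).map f).getD j 0 = f j := by
    intro f j hj
    simp [List.getD_eq_getElem?_getD, hj]
  have hzero : ∀ j : Nat, (List.replicate P (0 : Int)).getD j 0 = 0 := by
    intro j
    by_cases hj : j < P
    · simp [List.getD_eq_getElem?_getD, hj]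
    · rw [List.getD_eq_getElem?_getD, List.getElem?_eq_none (by simpa using Nat.le_of_not_lt hj)]
      rfl
  have hval : ∀ k ∈ tops, st.1.getD k []
      = (List.range P).map (fun p => ((pvCol data p).count k : Int)) := by
    intro k hk
    apply pvListEq _ _ (by rw [o2 k hk]; simp)
    intro j hj
    rw [List.length_map, List.length_range] at hj
    rw [o4 k hk j hj, hRHSgetD _ j hj, hinit, pvInit_getD tops hnd _ k, if_pos hk, hzero j,
      zero_add, List.count_eq_countP, pvCol, List.countP_map]
    rfl
  have hoth : ign = false → st.2
      = (List.range P).map (fun p => (((pvCol data p).countP (fun x => !(tops.contains x))) : Int)) := by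
    intro hign
    apply pvListEq _ _ (by rw [o3]; simp)
    intro j hj
    rw [List.length_map, List.length_range] at hj
    rw [o5 j hj, hRHSgetD _ j hj, hzero j, zero_add, hign, if_pos rfl, pvCol, List.countP_map]
    rfl
  cases ign with
  | true =>
    simp only [Bool.not_true, Bool.false_eq_true, if_false]
    rw [PySem.Dict.items_eq_map_keys _ (by rw [o1]; exact hnd) ([] : List Int), o1]
    unfold pvCanon
    simp only [reduceIte, List.append_nil]
    exact List.map_congr_left (fun k hk => by rw [hval k hk])
  | false =>
    simp only [Bool.not_false, if_true]
    have hcont : st.1.contains "Other" = false := by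
      rw [PySem.Dict.contains_eq_decide_mem_keys, o1]
      simpa using hO rfl
    rw [PySem.Dict.items_insert_of_not_contains _ _ hcont,
      PySem.Dict.items_eq_map_keys _ (by rw [o1]; exact hnd) ([] : List Int), o1]
    unfold pvCanon
    rw [if_neg (by decide : ¬ (false = true))]
    congr 1
    · exact List.map_congr_left (fun k hk => by rw [hval k hk])
    · rw [hoth rfl]


-- ===== VERDICT (by name: the statement is the Claim_ definition above) =====
theorem build_position_profiles_dict_spec : Claim_equal_build_position_profiles_dict := by
  intro data tops ign _ hpre
  unfold Spec_build_position_profiles_dict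
  rw [pvA_eq_canon data tops ign hpre.1 hpre.2, pvB_eq_canon data tops ign hpre.1 hpre.2]
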